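-- pv_equiv track=rewrite | github.com/j2cry/IntroPy | homework_4.py | task_6_iter_2
-- ===== SOURCE A (Python) =====
-- def task_6_iter_2(iter_count):      # по сути это itertools.repeat()
--     from itertools import cycle
--     st = ['german', 'shepherds', 'are', 'the', 'best', 'dogs', '!']
--     cnt = 0
--     for elem in cycle(st):
--         if cnt < iter_count:
--             yield elem
--         else:
--             return
--         cnt += 1
-- ===== SOURCE B (Python) =====
-- def task_6_iter_2(iter_count):
--     st = ['german', 'shepherds', 'are', 'the', 'best', 'dogs', '!']
--     if iter_count <= 0:
--         return
--     q, r = divmod(iter_count, len(st))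
--     yield from st * q
--     yield from st[:r]
-- ===== Notes on version B (the rewrite author's own statement) =====
-- stated objective: alternative
-- what changed: Replaces A's per-element loop over an itertools.cycle iterator with a bulk construction: divmod(iter_count, len(st)) gives q full copies of the list (st * q) plus a prefix slice st[:r], yielded in two staged 'yield from' passes with no per-element counter or conditional.
import Mathlib
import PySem

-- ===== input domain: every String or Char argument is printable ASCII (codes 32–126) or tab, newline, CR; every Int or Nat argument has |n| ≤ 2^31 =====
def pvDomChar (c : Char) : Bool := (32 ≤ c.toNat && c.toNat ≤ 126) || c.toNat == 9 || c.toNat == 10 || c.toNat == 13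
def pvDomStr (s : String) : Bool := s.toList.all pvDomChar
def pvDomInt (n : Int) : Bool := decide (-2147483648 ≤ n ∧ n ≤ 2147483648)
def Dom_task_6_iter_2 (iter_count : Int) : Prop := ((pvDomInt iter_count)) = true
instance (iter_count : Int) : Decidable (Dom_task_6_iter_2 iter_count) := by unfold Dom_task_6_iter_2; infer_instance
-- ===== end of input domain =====

-- B drops A's per-element cycle loop and builds the result in one shot from divmod:
-- whole copies of the word list (st * q) followed by a prefix slice (st[:r]); objective: alternative.

-- ===== PORT A =====
-- the fixed word list st
def pvSt : List String := ["german", "shepherds", "are", "the", "best", "dogs", "!"]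

-- A's loop: 'for elem in cycle(st)' is modelled by consuming the remaining suffix of st,
-- refilled with st when exhausted (exactly what itertools.cycle does for a finite list).
def pvGoA (n : Int) (rest : List String) (cnt : Int) : List String :=
  match rest with
  | [] => pvGoA n pvSt cnt
  | e :: rs => if cnt < n then e :: pvGoA n rs (cnt + 1) else []
termination_by (n - cnt).toNat * 2 + (if rest.isEmpty then 1 else 0)
decreasing_by
  · simp [pvSt]
  · simp only [List.isEmpty_cons]
    have : 1 ≤ (n - cnt).toNat := by omega
    have : (n - (cnt + 1)).toNat = (n - cnt).toNat - 1 := by omega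
    split <;> omega

def task_6_iter_2 (iter_count : Int) : List String := pvGoA iter_count pvSt 0

-- ===== PORT B =====
-- B: if iter_count <= 0: return; q, r = divmod(iter_count, 7); yield from st * q; yield from st[:r]
def task_6_iter_2_alt (iter_count : Int) : List String :=
  if iter_count ≤ 0 then []
  else
    let q := PySem.Int.floordiv iter_count 7
    let r := PySem.Int.mod iter_count 7
    (List.replicate q.toNat pvSt).flatten ++ PySem.List.slice pvSt none (some r)

-- ===== PRECONDITION & SPEC =====
def Spec_task_6_iter_2 (iter_count : Int) (out : List String) : Prop := out = task_6_iter_2_alt iter_count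
instance (iter_count : Int) (out : List String) : Decidable (Spec_task_6_iter_2 iter_count out) := by unfold Spec_task_6_iter_2; infer_instance

-- ===== CLAIM (what is proved, stated in full; the proofs are below) =====
def Claim_equal_task_6_iter_2 : Prop := ∀ (iter_count : Int), Dom_task_6_iter_2 iter_count → Spec_task_6_iter_2 iter_count (task_6_iter_2 iter_count)

-- ===== LEMMAS AND PROOFS =====

-- a structural (fuel = items still to yield) description of A's cycle loop
def pvGen : Nat → List String → List String
  | 0, _ => []
  | k+1, [] =>
    match pvSt with
    | [] => []
    | e :: rs => e :: pvGen k rs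
  | k+1, e :: rs => e :: pvGen k rs

theorem pvGen_nil (m : Nat) : pvGen m [] = pvGen m pvSt := by
  cases m <;> simp [pvGen, pvSt]

theorem pvGoA_eq_pvGen (n : Int) (rest : List String) (cnt : Int) :
    pvGoA n rest cnt = pvGen (n - cnt).toNat rest := by
  induction rest, cnt using pvGoA.induct (n := n) with
  | case1 cnt ih => rw [pvGoA, ih, pvGen_nil]
  | case2 cnt e rs hlt ih =>
    rw [pvGoA.eq_def]
    have h : (n - cnt).toNat = (n - (cnt + 1)).toNat + 1 := by omega
    simp [hlt, h, pvGen, ih]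
  | case3 cnt e rs hlt =>
    rw [pvGoA.eq_def]
    have h : (n - cnt).toNat = 0 := by omega
    simp [hlt, h, pvGen]

theorem pvGen_seven (k : Nat) : pvGen (k + 7) pvSt = pvSt ++ pvGen k pvSt := by
  show pvGen (k + 6 + 1) pvSt = _
  simp only [pvSt, pvGen, pvGen_nil, List.cons_append, List.nil_append]

theorem pvGen_closed (k : Nat) :
    pvGen k pvSt = (List.replicate (k / 7) pvSt).flatten ++ pvSt.take (k % 7) := by
  induction k using Nat.strong_induction_on with
  | _ k ih =>
    rcases lt_or_ge k 7 with h | h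
    · interval_cases k <;> rfl
    · obtain ⟨j, rfl⟩ : ∃ j, k = j + 7 := ⟨k - 7, by omega⟩
      rw [pvGen_seven, ih j (by omega)]
      have h1 : (j + 7) / 7 = j / 7 + 1 := by omega
      have h2 : (j + 7) % 7 = j % 7 := by omega
      rw [h1, h2, List.replicate_succ, List.flatten_cons, List.append_assoc]

-- ===== VERDICT (by name: the statement is the Claim_ definition above) =====
theorem task_6_iter_2_spec : Claim_equal_task_6_iter_2 := by
  intro n _
  unfold Spec_task_6_iter_2 task_6_iter_2 task_6_iter_2_alt
  rw [pvGoA_eq_pvGen]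
  by_cases hn : n ≤ 0
  · have hv : n.toNat = 0 := by omega
    simp [hn, hv, pvGen]
  · have hpos : 0 < n := by omega
    simp only [hn, if_false]
    rw [PySem.Int.floordiv_eq_ediv_of_pos (by omega),
        PySem.Int.mod_eq_emod_of_pos (by omega),
        PySem.List.slice_to pvSt (show (0:Int) ≤ n % 7 by omega)]
    have hsub : (n - 0).toNat = n.toNat := by omega
    rw [hsub, pvGen_closed]
    have hq : (n / 7).toNat = n.toNat / 7 := by omega
    have hr : (n % 7).toNat = n.toNat % 7 := by omega
    rw [hq, hr]
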